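-- pv_equiv track=rewrite | github.com/nandi-github/c-eNDinomics | src/simulator.py | _default_withdraw_sequence
-- ===== SOURCE A (Python) =====
-- from typing import Dict, List, Optional, Any, Tuple
--
-- def _default_withdraw_sequence(acct_names: List[str]) -> List[str]:
--     order = []
--
--     def is_brokerage(n: str) -> bool:
--         nu = n.upper()
--         return ("BROKERAGE" in nu) or ("TAXABLE" in nu)
--
--     def is_trad(n: str) -> bool:
--         nu = n.upper()
--         return (("TRAD" in nu) or ("TRADITIONAL" in nu)) and ("ROTH" not in nu)
--
--     def is_roth(n: str) -> bool:
--         nu = n.upper()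
--         return "ROTH" in nu
--
--     brokerages = [n for n in acct_names if is_brokerage(n)]
--     trads = [n for n in acct_names if is_trad(n)]
--     roths = [n for n in acct_names if is_roth(n)]
--     others = [n for n in acct_names if n not in brokerages + trads + roths]
--
--     order.extend(brokerages)
--     order.extend(trads)
--     order.extend(roths)
--     order.extend(others)
--     seen = set()
--     out = []
--     for n in order:
--         if n not in seen:
--             out.append(n)
--             seen.add(n)
--     return out
-- ===== SOURCE B (Python) =====
-- def _default_withdraw_sequence(acct_names):
--     def priority(n):
--         nu = n.upper()
--         if "BROKERAGE" in nu or "TAXABLE" in nu: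
--             return 0
--         if "TRAD" in nu and "ROTH" not in nu:
--             return 1
--         if "ROTH" in nu:
--             return 2
--         return 3
--     return list(dict.fromkeys(sorted(acct_names, key=priority)))
-- ===== Notes on version B (the rewrite author's own statement) =====
-- stated objective: faster
-- what changed: Replaces A's four filter passes, a quadratic 'others' pass that rebuilds and scans the concatenated bucket lists per element, and a manual seen-set loop with one stable sort by a 4-valued priority key followed by dict.fromkeys dedup.
import Mathlib
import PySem

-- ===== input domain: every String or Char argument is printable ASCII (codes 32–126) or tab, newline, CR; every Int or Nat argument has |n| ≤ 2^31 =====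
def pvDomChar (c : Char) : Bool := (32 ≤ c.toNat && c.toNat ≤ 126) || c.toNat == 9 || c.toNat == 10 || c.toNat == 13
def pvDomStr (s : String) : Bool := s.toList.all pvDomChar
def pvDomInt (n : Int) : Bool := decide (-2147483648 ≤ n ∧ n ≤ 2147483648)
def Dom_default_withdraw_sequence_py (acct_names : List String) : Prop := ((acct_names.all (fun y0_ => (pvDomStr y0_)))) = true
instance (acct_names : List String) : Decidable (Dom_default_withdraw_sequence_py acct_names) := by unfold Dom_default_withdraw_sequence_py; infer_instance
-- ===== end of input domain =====

-- B replaces A's four filter passes + quadratic membership 'others' pass + manual seen-set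
-- loop by one stable sort on a 4-valued priority key followed by ordered dedup (idiomatic).

-- ===== PORT A =====
def pvIsBrokerage (n : String) : Bool :=
  let nu := PySem.Str.upper n
  PySem.Str.isIn "BROKERAGE" nu || PySem.Str.isIn "TAXABLE" nu

def pvIsTrad (n : String) : Bool :=
  let nu := PySem.Str.upper n
  (PySem.Str.isIn "TRAD" nu || PySem.Str.isIn "TRADITIONAL" nu) && !(PySem.Str.isIn "ROTH" nu)

def pvIsRoth (n : String) : Bool :=
  PySem.Str.isIn "ROTH" (PySem.Str.upper n)

def default_withdraw_sequence_py (acct_names : List String) : List String :=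
  let brokerages := acct_names.filter (fun n => pvIsBrokerage n)
  let trads := acct_names.filter (fun n => pvIsTrad n)
  let roths := acct_names.filter (fun n => pvIsRoth n)
  let others := acct_names.filter (fun n => !((brokerages ++ trads ++ roths).contains n))
  let order := (([] : List String) ++ brokerages) ++ trads ++ roths ++ others
  (order.foldl
    (fun (st : PySem.Set String × List String) n =>
      if PySem.Set.contains st.1 n then st else (PySem.Set.add st.1 n, st.2 ++ [n]))
    (PySem.Set.empty, [])).2

-- ===== PORT B =====
def pvPriority (n : String) : Int :=
  let nu := PySem.Str.upper n
  if PySem.Str.isIn "BROKERAGE" nu || PySem.Str.isIn "TAXABLE" nu then 0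
  else if PySem.Str.isIn "TRAD" nu && !(PySem.Str.isIn "ROTH" nu) then 1
  else if PySem.Str.isIn "ROTH" nu then 2
  else 3

def default_withdraw_sequence_py_alt (acct_names : List String) : List String :=
  PySem.List.dedup (PySem.List.sorted acct_names pvPriority)

-- ===== PRECONDITION & SPEC =====
def Spec_default_withdraw_sequence_py (acct_names : List String) (out : List String) : Prop := out = default_withdraw_sequence_py_alt acct_names
instance (acct_names : List String) (out : List String) : Decidable (Spec_default_withdraw_sequence_py acct_names out) := by unfold Spec_default_withdraw_sequence_py; infer_instance

-- ===== CLAIM (what is proved, stated in full; the proofs are below) =====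
def Claim_equal_default_withdraw_sequence_py : Prop := ∀ (acct_names : List String), Dom_default_withdraw_sequence_py acct_names → Spec_default_withdraw_sequence_py acct_names (default_withdraw_sequence_py acct_names)

-- ===== LEMMAS AND PROOFS =====

-- "TRADITIONAL" in nu implies "TRAD" in nu (substring transitivity).
theorem pv_traditional_imp_trad (nu : String) :
    PySem.Str.isIn "TRADITIONAL" nu = true → PySem.Str.isIn "TRAD" nu = true := by
  intro h
  rw [PySem.Str.isIn_iff_infix] at h ⊢
  exact List.IsInfix.trans (by decide) h

-- priority-value characterisations
theorem pvPriority_eq_zero (n : String) : pvPriority n = 0 ↔ pvIsBrokerage n = true := by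
  unfold pvPriority pvIsBrokerage
  dsimp only
  split_ifs with h1 h2 h3 <;> simp_all

theorem pvPriority_eq_one (n : String) :
    pvPriority n = 1 ↔ (pvIsTrad n && !pvIsBrokerage n) = true := by
  have hrel := pv_traditional_imp_trad (PySem.Str.upper n)
  unfold pvPriority pvIsTrad pvIsBrokerage
  dsimp only
  split_ifs with h1 h2 h3 <;> simp_all <;> (intros; simp_all)

theorem pvPriority_eq_two (n : String) :
    pvPriority n = 2 ↔ (pvIsRoth n && !pvIsBrokerage n) = true := by
  unfold pvPriority pvIsRoth pvIsBrokerage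
  dsimp only
  split_ifs with h1 h2 h3 <;> simp_all <;> (intros; simp_all)

theorem pvPriority_eq_three (n : String) :
    pvPriority n = 3 ↔ (!pvIsBrokerage n && !pvIsTrad n && !pvIsRoth n) = true := by
  have hrel := pv_traditional_imp_trad (PySem.Str.upper n)
  unfold pvPriority pvIsTrad pvIsRoth pvIsBrokerage
  dsimp only
  split_ifs with h1 h2 h3 <;> simp_all <;> (intros; simp_all)

theorem pvPriority_cases (n : String) :
    pvPriority n = 0 ∨ pvPriority n = 1 ∨ pvPriority n = 2 ∨ pvPriority n = 3 := by
  unfold pvPriority; dsimp only; split_ifs <;> simp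

-- the bucket decomposition of the stable sort
def pvBucket (l : List String) (i : Int) : List String :=
  l.filter (fun n => decide (pvPriority n = i))

def pvBuckets (l : List String) : List String :=
  pvBucket l 0 ++ pvBucket l 1 ++ pvBucket l 2 ++ pvBucket l 3

theorem insertBy_split {α : Type} (before : α → α → Bool) (x : α) (P S : List α)
    (hP : ∀ y ∈ P, before x y = false) (hS : ∀ y ∈ S, before x y = true) :
    PySem.List.insertBy before x (P ++ S) = P ++ x :: S := by
  induction P with
  | nil =>
    cases S with
    | nil => rfl
    | cons s S' => simp [PySem.List.insertBy, hS s (by simp)]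
  | cons p P' ih =>
    simp [PySem.List.insertBy, hP p (by simp),
      ih (fun y hy => hP y (by simp [hy])) ]

theorem pv_mem_bucket (l : List String) (i : Int) (y : String) :
    y ∈ pvBucket l i → pvPriority y = i := by
  intro hy
  rw [pvBucket, List.mem_filter] at hy
  exact of_decide_eq_true hy.2

theorem pv_bucket_append_singleton (l : List String) (x : String) (i : Int) :
    pvBucket (l ++ [x]) i = pvBucket l i ++ (if pvPriority x = i then [x] else []) := by
  simp only [pvBucket, List.filter_append]
  split_ifs <;> simp_all

theorem sorted_eq_buckets (l : List String) :
    PySem.List.sorted l pvPriority = pvBuckets l := by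
  rw [PySem.List.sorted_eq_foldl_insertBy]
  induction l using List.reverseRecOn with
  | nil => rfl
  | append_singleton l x ih =>
    rw [List.foldl_append, List.foldl_cons, List.foldl_nil, ih]
    rcases pvPriority_cases x with h | h | h | h
    · have hsplit := insertBy_split (fun a b => decide (pvPriority a < pvPriority b)) x
        (pvBucket l 0) (pvBucket l 1 ++ pvBucket l 2 ++ pvBucket l 3)
        (fun y hy => by simp [pv_mem_bucket l 0 y hy, h])
        (fun y hy => by
          rcases List.mem_append.1 hy with hy' | hy'
          · rcases List.mem_append.1 hy' with h2 | h2
            · simp [pv_mem_bucket l 1 y h2, h]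
            · simp [pv_mem_bucket l 2 y h2, h]
          · simp [pv_mem_bucket l 3 y hy', h])
      have hPS : pvBuckets l =
          pvBucket l 0 ++ (pvBucket l 1 ++ pvBucket l 2 ++ pvBucket l 3) := by
        simp [pvBuckets]
      rw [hPS, hsplit]
      unfold pvBuckets
      rw [pv_bucket_append_singleton, pv_bucket_append_singleton,
        pv_bucket_append_singleton, pv_bucket_append_singleton]
      simp [h]
    · have hsplit := insertBy_split (fun a b => decide (pvPriority a < pvPriority b)) x
        (pvBucket l 0 ++ pvBucket l 1) (pvBucket l 2 ++ pvBucket l 3)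
        (fun y hy => by
          rcases List.mem_append.1 hy with h2 | h2
          · simp [pv_mem_bucket l 0 y h2, h]
          · simp [pv_mem_bucket l 1 y h2, h])
        (fun y hy => by
          rcases List.mem_append.1 hy with h2 | h2
          · simp [pv_mem_bucket l 2 y h2, h]
          · simp [pv_mem_bucket l 3 y h2, h])
      have hPS : pvBuckets l =
          (pvBucket l 0 ++ pvBucket l 1) ++ (pvBucket l 2 ++ pvBucket l 3) := by
        simp [pvBuckets]
      rw [hPS, hsplit]
      unfold pvBuckets
      rw [pv_bucket_append_singleton, pv_bucket_append_singleton,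
        pv_bucket_append_singleton, pv_bucket_append_singleton]
      simp [h]
    · have hsplit := insertBy_split (fun a b => decide (pvPriority a < pvPriority b)) x
        (pvBucket l 0 ++ pvBucket l 1 ++ pvBucket l 2) (pvBucket l 3)
        (fun y hy => by
          rcases List.mem_append.1 hy with hy' | h2
          · rcases List.mem_append.1 hy' with h2 | h2
            · simp [pv_mem_bucket l 0 y h2, h]
            · simp [pv_mem_bucket l 1 y h2, h]
          · simp [pv_mem_bucket l 2 y h2, h])
        (fun y hy => by simp [pv_mem_bucket l 3 y hy, h])
      have hPS : pvBuckets l =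
          (pvBucket l 0 ++ pvBucket l 1 ++ pvBucket l 2) ++ pvBucket l 3 := by
        simp [pvBuckets]
      rw [hPS, hsplit]
      unfold pvBuckets
      rw [pv_bucket_append_singleton, pv_bucket_append_singleton,
        pv_bucket_append_singleton, pv_bucket_append_singleton]
      simp [h]
    · have hsplit := insertBy_split (fun a b => decide (pvPriority a < pvPriority b)) x
        (pvBucket l 0 ++ pvBucket l 1 ++ pvBucket l 2 ++ pvBucket l 3) []
        (fun y hy => by
          rcases List.mem_append.1 hy with hy' | h2
          · rcases List.mem_append.1 hy' with hy'' | h2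
            · rcases List.mem_append.1 hy'' with h2 | h2
              · simp [pv_mem_bucket l 0 y h2, h]
              · simp [pv_mem_bucket l 1 y h2, h]
            · simp [pv_mem_bucket l 2 y h2, h]
          · simp [pv_mem_bucket l 3 y h2, h])
        (fun y hy => by simp at hy)
      rw [List.append_nil] at hsplit
      rw [show pvBuckets l = pvBucket l 0 ++ pvBucket l 1 ++ pvBucket l 2 ++ pvBucket l 3 from rfl,
        hsplit]
      unfold pvBuckets
      rw [pv_bucket_append_singleton, pv_bucket_append_singleton,
        pv_bucket_append_singleton, pv_bucket_append_singleton]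
      simp [h]

-- A's seen-set loop is a fold of Set.add (the out list and the seen set coincide)
theorem pv_foldl_add_out (l : List String) :
    ∀ (s : PySem.Set String),
      (l.foldl (fun (st : PySem.Set String × List String) n =>
        if PySem.Set.contains st.1 n then st else (PySem.Set.add st.1 n, st.2 ++ [n])) (s, s)).2
      = l.foldl PySem.Set.add s := by
  induction l with
  | nil => intro s; rfl
  | cons x l ih =>
    intro s
    rw [List.foldl_cons, List.foldl_cons]
    by_cases h : PySem.Set.contains s x = true
    · rw [if_pos h, show PySem.Set.add s x = s from by rw [PySem.Set.add, if_pos h]]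
      exact ih s
    · have hadd : PySem.Set.add s x = s ++ [x] := by rw [PySem.Set.add, if_neg h]
      rw [if_neg h, hadd]
      exact ih (s ++ [x])

theorem pv_mem_foldl_add (l : List String) :
    ∀ (s : PySem.Set String) (x : String), x ∈ s → x ∈ l.foldl PySem.Set.add s := by
  induction l with
  | nil => intro s x hx; exact hx
  | cons y l ih =>
    intro s x hx
    exact ih _ x (by simp [PySem.Set.mem_add, hx])

-- folding Set.add over ys absorbs elements already in the accumulated set
theorem pv_foldl_add_filter (l : List String) (p : String → Bool) :
    ∀ (s : PySem.Set String), (∀ y ∈ l, p y = false → y ∈ s) →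
      l.foldl PySem.Set.add s = (l.filter p).foldl PySem.Set.add s := by
  induction l with
  | nil => intro s _; rfl
  | cons x l ih =>
    intro s hs
    by_cases hp : p x = true
    · simp only [List.filter_cons, hp, if_pos, List.foldl_cons]
      exact ih _ (fun y hy hpy => by simp [PySem.Set.mem_add, hs y (by simp [hy]) hpy])
    · have hx : x ∈ s := hs x (by simp) (by simpa using hp)
      have hkeep : PySem.Set.add s x = s := by
        rw [PySem.Set.add, if_pos]
        simpa [PySem.Set.contains] using hx
      simp only [List.filter_cons, List.foldl_cons, hp, hkeep]
      exact ih s (fun y hy hpy => hs y (by simp [hy]) hpy)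

-- ===== VERDICT (by name: the statement is the Claim_ definition above) =====
set_option maxHeartbeats 1600000 in
theorem default_withdraw_sequence_py_spec : Claim_equal_default_withdraw_sequence_py := by
  intro l _
  unfold Spec_default_withdraw_sequence_py default_withdraw_sequence_py default_withdraw_sequence_py_alt
  rw [sorted_eq_buckets, PySem.List.dedup_eq_ofList, PySem.Set.ofList_eq_foldl]
  dsimp only
  rw [show (PySem.Set.empty, ([] : List String)) = (([] : PySem.Set String), ([] : List String)) from rfl]
  rw [pv_foldl_add_out, List.nil_append, List.foldl_append, List.foldl_append, List.foldl_append]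
  -- bucket 0 is exactly A's brokerages
  have hb0 : List.filter (fun n => pvIsBrokerage n) l = pvBucket l 0 := by
    refine List.filter_congr ?_
    intro n _
    rw [Bool.eq_iff_iff]
    simp [pvPriority_eq_zero]
  -- absorb brokerage names out of A's trads bucket
  have h1 : (List.filter (fun n => pvIsTrad n) l).foldl PySem.Set.add
        (List.foldl PySem.Set.add [] (List.filter (fun n => pvIsBrokerage n) l))
      = (pvBucket l 1).foldl PySem.Set.add
        (List.foldl PySem.Set.add [] (List.filter (fun n => pvIsBrokerage n) l)) := by
    rw [pv_foldl_add_filter (List.filter (fun n => pvIsTrad n) l) (fun n => !pvIsBrokerage n)]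
    · congr 1
      rw [List.filter_filter]
      refine List.filter_congr ?_
      intro n _
      rw [Bool.eq_iff_iff]
      simp [pvPriority_eq_one, and_comm]
    · intro y hy hpy
      rw [← PySem.Set.ofList_eq_foldl, PySem.Set.mem_ofList, List.mem_filter]
      exact ⟨(List.mem_filter.1 hy).1, by simpa using hpy⟩
  -- absorb brokerage names out of A's roths bucket
  have h2 : ∀ (s : PySem.Set String),
      (∀ y, pvIsBrokerage y = true → y ∈ l → y ∈ s) →
      (List.filter (fun n => pvIsRoth n) l).foldl PySem.Set.add s
        = (pvBucket l 2).foldl PySem.Set.add s := by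
    intro s hs
    rw [pv_foldl_add_filter (List.filter (fun n => pvIsRoth n) l) (fun n => !pvIsBrokerage n)]
    · congr 1
      rw [List.filter_filter]
      refine List.filter_congr ?_
      intro n _
      rw [Bool.eq_iff_iff]
      simp [pvPriority_eq_two, and_comm]
    · intro y hy hpy
      exact hs y (by simpa using hpy) (List.mem_filter.1 hy).1
  -- A's others bucket is exactly bucket 3
  have hb3 : List.filter
      (fun n => !((List.filter (fun n => pvIsBrokerage n) l ++ List.filter (fun n => pvIsTrad n) l ++
          List.filter (fun n => pvIsRoth n) l).contains n)) l = pvBucket l 3 := by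
    refine List.filter_congr ?_
    intro n hn
    rw [Bool.eq_iff_iff]
    simp only [decide_eq_true_eq, pvPriority_eq_three, Bool.not_eq_true',
      List.contains_eq_mem, List.mem_append, List.mem_filter, decide_eq_false_iff_not]
    constructor
    · intro h
      push_neg at h
      simp [h.1.1 hn, h.1.2 hn, h.2 hn]
    · intro h
      simp only [Bool.and_eq_true, Bool.not_eq_true'] at h
      push_neg
      exact ⟨⟨fun _ => by simp [h.1.1], fun _ => by simp [h.1.2]⟩, fun _ => by simp [h.2]⟩
  rw [h1]
  rw [h2 _ (fun y hy hyl => by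
    refine pv_mem_foldl_add _ _ y ?_
    rw [← PySem.Set.ofList_eq_foldl, PySem.Set.mem_ofList]
    exact List.mem_filter.2 ⟨hyl, hy⟩)]
  rw [hb3, hb0]
  show _ = List.foldl PySem.Set.add [] (pvBucket l 0 ++ pvBucket l 1 ++ pvBucket l 2 ++ pvBucket l 3)
  rw [List.foldl_append, List.foldl_append, List.foldl_append]
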